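-- pv_equiv track=rewrite | github.com/miliar/Code_Jam_Webscraper | solutions_python/Problem_155/1924.py | get_number_of_friends
-- ===== SOURCE A (Python) =====
-- def get_number_of_friends(shyness_array):
-- 	total_used = 0
-- 	num_standing = 0
-- 	for i in range(len(shyness_array)):
-- 		if shyness_array[i] and i > num_standing:
-- 			num_to_add = i - num_standing
-- 			total_used += num_to_add
-- 			num_standing += num_to_add
-- 		num_standing += shyness_array[i]
-- 	return total_used
-- ===== SOURCE B (Python) =====
-- def get_number_of_friends(shyness_array):
--     def feasible(k):
--         prefix = 0
--         for i, s in enumerate(shyness_array):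
--             if s and prefix + k < i:
--                 return False
--             prefix += s
--         return True
--     lo = 0
--     hi = len(shyness_array) + sum(abs(s) for s in shyness_array)
--     while lo < hi:
--         mid = (lo + hi) // 2
--         if feasible(mid):
--             hi = mid
--         else:
--             lo = mid + 1
--     return lo
-- ===== Notes on version B (the rewrite author's own statement) =====
-- stated objective: alternative
-- what changed: Replaces A's one-pass stateful greedy by binary search on the answer: a monotone feasibility predicate (can k invited friends keep everyone standing?) is checked per candidate k, and the minimal feasible k is found by bisection.
import Mathlib
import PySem

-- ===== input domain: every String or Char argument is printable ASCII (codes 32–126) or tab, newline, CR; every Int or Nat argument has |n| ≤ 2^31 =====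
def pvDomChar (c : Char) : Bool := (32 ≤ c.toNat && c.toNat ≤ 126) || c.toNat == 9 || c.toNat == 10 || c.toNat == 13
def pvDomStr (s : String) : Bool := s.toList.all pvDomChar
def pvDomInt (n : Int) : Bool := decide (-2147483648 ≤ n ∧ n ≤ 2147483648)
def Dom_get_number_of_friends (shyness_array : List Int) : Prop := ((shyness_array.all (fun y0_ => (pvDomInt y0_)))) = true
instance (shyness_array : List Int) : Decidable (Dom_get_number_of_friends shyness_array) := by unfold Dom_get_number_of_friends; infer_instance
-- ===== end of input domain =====

-- B replaces A's one-pass greedy with binary search on the answer over a monotone feasibility check (alternative algorithm).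

-- ===== PORT A =====
def get_number_of_friends (shyness_array : List Int) : Int :=
  (PySem.List.enumerate shyness_array).foldl
    (fun (st : Int × Int) (q : Int × Int) =>
      let st' :=
        if q.2 ≠ 0 ∧ q.1 > st.2 then
          let num_to_add := q.1 - st.2
          (st.1 + num_to_add, st.2 + num_to_add)
        else (st.1, st.2)
      (st'.1, st'.2 + q.2)) (0, 0) |>.1

-- ===== PORT B =====
-- the inner 'for … return False' loop of feasible(k), as structural recursion over (index, prefix)
def pvFeasible (xs : List Int) (k : Int) (i : Int) (p : Int) : Bool :=
  match xs with
  | [] => true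
  | s :: rest => if s ≠ 0 ∧ p + k < i then false else pvFeasible rest k (i + 1) (p + s)

-- the 'while lo < hi' bisection loop
def pvBisect (xs : List Int) (lo hi : Int) : Int :=
  if h : lo < hi then
    let mid := PySem.Int.floordiv (lo + hi) 2
    if pvFeasible xs mid 0 0 then pvBisect xs lo mid else pvBisect xs (mid + 1) hi
  else lo
termination_by (hi - lo).toNat
decreasing_by
  · have hb := (PySem.Int.floordiv_eq_iff_of_pos (a := lo + hi) (b := 2)
      (q := PySem.Int.floordiv (lo + hi) 2) (by norm_num)).mp rfl
    omega
  · have hb := (PySem.Int.floordiv_eq_iff_of_pos (a := lo + hi) (b := 2)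
      (q := PySem.Int.floordiv (lo + hi) 2) (by norm_num)).mp rfl
    omega

def get_number_of_friends_alt (shyness_array : List Int) : Int :=
  pvBisect shyness_array 0 ((shyness_array.length : Int) + (shyness_array.map (fun s => |s|)).sum)

-- ===== PRECONDITION & SPEC =====
def Spec_get_number_of_friends (shyness_array : List Int) (out : Int) : Prop := out = get_number_of_friends_alt shyness_array
instance (shyness_array : List Int) (out : Int) : Decidable (Spec_get_number_of_friends shyness_array out) := by unfold Spec_get_number_of_friends; infer_instance

-- ===== CLAIM (what is proved, stated in full; the proofs are below) =====
def Claim_equal_get_number_of_friends : Prop := ∀ (shyness_array : List Int), Dom_get_number_of_friends shyness_array → Spec_get_number_of_friends shyness_array (get_number_of_friends shyness_array)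

-- ===== LEMMAS AND PROOFS =====

def pvStepA : Int × Int → Int × Int → Int × Int := fun st q =>
  let st' :=
    if q.2 ≠ 0 ∧ q.1 > st.2 then
      let num_to_add := q.1 - st.2
      (st.1 + num_to_add, st.2 + num_to_add)
    else (st.1, st.2)
  (st'.1, st'.2 + q.2)

-- A's running total only grows along the fold.
theorem pv_mono (xs : List Int) : ∀ (k t st : Int),
    t ≤ ((PySem.List.enumerate xs k).foldl pvStepA (t, st)).1 := by
  induction xs with
  | nil => intro k t st; simp [PySem.List.enumerate_nil]
  | cons s rest ih =>
    intro k t st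
    simp only [PySem.List.enumerate_cons, List.foldl_cons]
    by_cases h : s ≠ 0 ∧ k > st
    · have : pvStepA (t, st) (k, s) = (t + (k - st), st + (k - st) + s) := by
        simp [pvStepA, h]
      rw [this]
      have := ih (k + 1) (t + (k - st)) (st + (k - st) + s)
      omega
    · have : pvStepA (t, st) (k, s) = (t, st + s) := by
        simp only [pvStepA, if_neg h]
      rw [this]
      exact ih (k + 1) t (st + s)

-- Feasibility ⇔ A's final total ≤ k, linking feasible's prefix p to A's state (t, p + t), for t ≤ k.
theorem pv_feas_iff (xs : List Int) : ∀ (k i t p : Int), t ≤ k →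
    (pvFeasible xs k i p = true ↔ ((PySem.List.enumerate xs i).foldl pvStepA (t, p + t)).1 ≤ k) := by
  induction xs with
  | nil => intro k i t p ht; simp [pvFeasible, PySem.List.enumerate_nil]; omega
  | cons s rest ih =>
    intro k i t p ht
    simp only [PySem.List.enumerate_cons, List.foldl_cons, pvFeasible]
    by_cases hs : s = 0
    · have hA : pvStepA (t, p + t) (i, s) = (t, (p + s) + t) := by
        subst hs; simp [pvStepA]
      rw [hA]
      rw [if_neg (by simp [hs])]
      exact ih k (i + 1) t (p + s) ht
    · by_cases hi : i > p + t
      · -- A updates: t' = i - p; feasible fails iff p + k < i, i.e. k < t'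
        have hA : pvStepA (t, p + t) (i, s) = (i - p, (p + s) + (i - p)) := by
          simp only [pvStepA, if_pos (show s ≠ 0 ∧ i > p + t from ⟨hs, hi⟩), Prod.mk.injEq]
          omega
        rw [hA]
        by_cases hk : p + k < i
        · simp only [if_pos (⟨hs, hk⟩ : s ≠ 0 ∧ p + k < i)]
          have := pv_mono rest (i + 1) (i - p) ((p + s) + (i - p))
          constructor
          · intro hfalse; exact absurd hfalse (by simp)
          · intro hle; omega
        · simp only [if_neg (show ¬(s ≠ 0 ∧ p + k < i) from fun hc => absurd hc.2 (by omega))]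
          exact ih k (i + 1) (i - p) (p + s) (by omega)
      · -- no update; feasible passes since p + k ≥ p + t ≥ i
        have hA : pvStepA (t, p + t) (i, s) = (t, (p + s) + t) := by
          unfold pvStepA
          split_ifs with hcond
          · exact absurd hcond.2 hi
          · simp only [Prod.mk.injEq]; exact ⟨trivial, by ring⟩
        rw [hA]
        rw [if_neg (show ¬(s ≠ 0 ∧ p + k < i) from fun hc => absurd hc.2 (by omega))]
        exact ih k (i + 1) t (p + s) ht

-- Feasibility holds once k covers the remaining length plus the total magnitude of entries.
theorem pv_feas_big (xs : List Int) : ∀ (k i p : Int),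
    i - p + (xs.length : Int) + (xs.map (fun s => |s|)).sum ≤ k → pvFeasible xs k i p = true := by
  induction xs with
  | nil => intro k i p _; simp [pvFeasible]
  | cons s rest ih =>
    intro k i p hk
    simp only [List.map_cons, List.sum_cons, List.length_cons] at hk
    have habs : -s ≤ |s| ∧ 0 ≤ |s| := ⟨neg_le_abs s, abs_nonneg s⟩
    have hsum : 0 ≤ (rest.map (fun s => |s|)).sum :=
      List.sum_nonneg (by intro x hx; simp at hx; obtain ⟨y, _, hy⟩ := hx; rw [← hy]; exact abs_nonneg y)
    simp only [pvFeasible]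
    rw [if_neg (by push_cast at hk; omega)]
    exact ih k (i + 1) (p + s) (by push_cast at hk ⊢; omega)

-- Bisection returns the unique r with lo ≤ r ≤ hi that equals A's value, given A's value lies in [lo, hi].
theorem pv_bisect_eq (xs : List Int) : ∀ (n : Nat) (lo hi : Int), (hi - lo).toNat = n →
    0 ≤ lo → lo ≤ get_number_of_friends xs → get_number_of_friends xs ≤ hi →
    pvBisect xs lo hi = get_number_of_friends xs := by
  intro n
  induction n using Nat.strong_induction_on with
  | _ n ih =>
    intro lo hi hn hlo hloA hAhi
    rw [pvBisect]
    by_cases h : lo < hi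
    · rw [dif_pos h]
      set mid := PySem.Int.floordiv (lo + hi) 2 with hmiddef
      have hmid := (PySem.Int.floordiv_eq_iff_of_pos (a := lo + hi) (b := 2)
        (q := mid) (by norm_num)).mp hmiddef.symm
      have hiff := pv_feas_iff xs mid 0 0 0 (by omega)
      simp only [add_zero] at hiff
      have hA0 : ((PySem.List.enumerate xs 0).foldl pvStepA (0, 0)).1 = get_number_of_friends xs := rfl
      rw [hA0] at hiff
      by_cases hf : pvFeasible xs mid 0 0 = true
      · rw [if_pos hf]
        exact ih (hi - lo - (hi - mid)).toNat (by omega) lo mid (by omega) hlo hloA (hiff.mp hf)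
      · rw [if_neg hf]
        have : ¬ get_number_of_friends xs ≤ mid := fun hle => hf (hiff.mpr hle)
        exact ih (hi - mid - 1).toNat (by omega) (mid + 1) hi (by omega) (by omega) (by omega) hAhi
    · rw [dif_neg h]; omega

-- ===== VERDICT (by name: the statement is the Claim_ definition above) =====
theorem get_number_of_friends_spec : Claim_equal_get_number_of_friends := by
  intro xs _
  unfold Spec_get_number_of_friends get_number_of_friends_alt
  have hA0 : ((PySem.List.enumerate xs 0).foldl pvStepA (0, 0)).1 = get_number_of_friends xs := rfl
  have hge : 0 ≤ get_number_of_friends xs := by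
    rw [← hA0]; exact pv_mono xs 0 0 0
  have hsum : 0 ≤ (xs.map (fun s => |s|)).sum :=
    List.sum_nonneg (by intro x hx; simp at hx; obtain ⟨y, _, hy⟩ := hx; rw [← hy]; exact abs_nonneg y)
  set hi := (xs.length : Int) + (xs.map (fun s => |s|)).sum with hhidef
  have hfeas : pvFeasible xs hi 0 0 = true := pv_feas_big xs hi 0 0 (by omega)
  have hle : get_number_of_friends xs ≤ hi := by
    rw [← hA0]
    have := (pv_feas_iff xs hi 0 0 0 (by omega))
    simp only [add_zero] at this
    exact this.mp hfeas
  exact (pv_bisect_eq xs (hi - 0).toNat 0 hi rfl le_rfl hge hle).symm
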